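-- pv_equiv track=rewrite | github.com/HaneulJung/Programmers | Lv. 0/숨어있는 숫자의 덧셈(2).py | solution
-- ===== SOURCE A (Python) =====
-- def solution(my_string):
--     answer = 0
--     number = ''
--
--     for i in range(len(my_string)):
--         if my_string[i].isdigit():
--             number += my_string[i]
--         else:
--             if number == '':
--                 pass
--             else:
--                 answer += int(number)
--                 number = ''
--
--     if number != '':
--         answer += int(number)
--
--     return answer
-- ===== SOURCE B (Python) =====
-- def solution(my_string):
--     tokens = ''.join(c if c.isdigit() else ' ' for c in my_string).split()
--     return sum(int(t) for t in tokens)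
-- ===== Notes on version B (the rewrite author's own statement) =====
-- stated objective: idiomatic
-- what changed: Replaces A's single interleaved accumulate/flush state-machine loop with a two-phase tokenize-then-sum: mask non-digit characters to spaces, split into digit tokens, then sum int(token).
import Mathlib
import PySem

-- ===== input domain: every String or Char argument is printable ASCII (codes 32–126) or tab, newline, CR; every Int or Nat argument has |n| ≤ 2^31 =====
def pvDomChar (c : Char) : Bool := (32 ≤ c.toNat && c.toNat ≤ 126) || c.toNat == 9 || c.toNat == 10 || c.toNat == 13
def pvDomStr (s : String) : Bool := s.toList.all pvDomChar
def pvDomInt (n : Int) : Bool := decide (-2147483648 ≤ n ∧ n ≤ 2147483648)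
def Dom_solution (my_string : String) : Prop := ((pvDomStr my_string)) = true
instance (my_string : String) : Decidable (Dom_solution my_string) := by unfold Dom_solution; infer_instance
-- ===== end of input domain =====

-- B replaces A's interleaved accumulate/flush state machine with tokenize-then-sum (mask, split, sum); same O(n) cost, plainer shape.

-- ===== PORT A =====
-- loop state: (answer, number); int(number) is ported as (ofChars? …).getD 0 —
-- number is a nonempty run of digit chars whenever it is converted, so ofChars? is some there.
def solStep (st : Int × List Char) (c : Char) : Int × List Char :=
  if PySem.Chars.isdigit c then (st.1, st.2 ++ [c])
  else if st.2 = [] then st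
  else (st.1 + (PySem.Int.ofChars? st.2).getD 0, [])

def solution (my_string : String) : Int :=
  let st := my_string.toList.foldl solStep (0, [])
  if st.2 ≠ [] then st.1 + (PySem.Int.ofChars? st.2).getD 0 else st.1

-- ===== PORT B =====
-- ''.join(c if c.isdigit() else ' ' for c in my_string) is the per-char map below; .split() is Chars.split₀;
-- each token is a nonempty digit run, so int(t) is (ofChars? t).getD 0 with the default unreachable.
def solution_alt (my_string : String) : Int :=
  let tokens := PySem.Chars.split₀ (my_string.toList.map (fun c => if PySem.Chars.isdigit c then c else ' '))
  (tokens.map (fun t => (PySem.Int.ofChars? t).getD 0)).sum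

-- ===== PRECONDITION & SPEC =====
def Spec_solution (my_string : String) (out : Int) : Prop := out = solution_alt my_string
instance (my_string : String) (out : Int) : Decidable (Spec_solution my_string out) := by unfold Spec_solution; infer_instance

-- ===== CLAIM (what is proved, stated in full; the proofs are below) =====
def Claim_equal_solution : Prop := ∀ (my_string : String), Dom_solution my_string → Spec_solution my_string (solution my_string)

-- ===== LEMMAS AND PROOFS =====

def maskC (c : Char) : Char := if PySem.Chars.isdigit c then c else ' '

def intD (t : List Char) : Int := (PySem.Int.ofChars? t).getD 0

theorem digit_not_space (c : Char) (h : PySem.Chars.isdigit c = true) :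
    PySem.Chars.isspace c = false := by
  rw [PySem.Chars.isdigit] at h
  simp only [Bool.and_eq_true, decide_eq_true_eq] at h
  have h1 : 48 ≤ c.toNat := Nat.succ_le_of_lt h.1
  have h2 : c.toNat ≤ 57 := h.2
  rw [PySem.Chars.isspace]
  simp only [Bool.or_eq_false_iff, Bool.and_eq_false_iff, decide_eq_false_iff_not]
  omega

theorem go_nil (cur : List Char) (acc : List (List Char)) :
    PySem.Chars.split₀.go [] cur acc =
      (if cur.isEmpty then acc.reverse else (cur.reverse :: acc).reverse) := rfl

theorem go_cons (c : Char) (rest cur : List Char) (acc : List (List Char)) :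
    PySem.Chars.split₀.go (c :: rest) cur acc =
      (if PySem.Chars.isspace c then
        (if cur.isEmpty then PySem.Chars.split₀.go rest [] acc
         else PySem.Chars.split₀.go rest [] (cur.reverse :: acc))
       else PySem.Chars.split₀.go rest (c :: cur) acc) := rfl

theorem go_acc (s : List Char) : ∀ (cur : List Char) (acc : List (List Char)),
    PySem.Chars.split₀.go s cur acc = acc.reverse ++ PySem.Chars.split₀.go s cur [] := by
  induction s with
  | nil =>
    intro cur acc
    by_cases h : cur.isEmpty <;> simp [go_nil, h]
  | cons c rest ih =>
    intro cur acc
    by_cases hs : PySem.Chars.isspace c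
    · by_cases h : cur.isEmpty
      · simp only [go_cons, hs, h, if_true]
        exact ih [] acc
      · simp only [go_cons, hs, h, if_true, Bool.false_eq_true, if_false]
        rw [ih [] (cur.reverse :: acc), ih [] [cur.reverse]]
        simp
    · simp only [go_cons, hs, Bool.false_eq_true, if_false]
      exact ih _ _

theorem main_lemma (l : List Char) : ∀ (a : Int) (num : List Char),
    (∀ c ∈ num, PySem.Chars.isdigit c = true) →
    (let st := l.foldl solStep (a, num);
     if st.2 ≠ [] then st.1 + intD st.2 else st.1)
    = a + ((PySem.Chars.split₀.go (l.map maskC) num.reverse []).map intD).sum := by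
  induction l with
  | nil =>
    intro a num hnum
    by_cases h : num = []
    · simp [h, go_nil]
    · have hne : num.reverse.isEmpty = false := by
        simpa using h
      simp [h, go_nil, hne]
  | cons c rest ih =>
    intro a num hnum
    by_cases hd : PySem.Chars.isdigit c
    · have hns : PySem.Chars.isspace c = false := digit_not_space c hd
      simp only [List.foldl_cons, List.map_cons, solStep, hd, if_true, maskC]
      rw [go_cons, hns]
      simp only [Bool.false_eq_true, if_false]
      have h2 := ih a (num ++ [c]) (by
        intro x hx
        rcases List.mem_append.mp hx with h1 | h1
        · exact hnum x h1
        · simp at h1; subst h1; exact hd)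
      simpa using h2
    · have hd' : PySem.Chars.isdigit c = false := by simpa using hd
      have hsp : PySem.Chars.isspace (' ' : Char) = true := by decide
      simp only [List.foldl_cons, List.map_cons, solStep, hd', Bool.false_eq_true, if_false, maskC]
      by_cases h0 : num = []
      · subst h0
        simp only [if_true, List.reverse_nil]
        rw [go_cons, hsp]
        simp only [if_true, List.isEmpty_nil]
        exact ih a [] (by simp)
      · have hne : num.reverse.isEmpty = false := by simpa using h0
        simp only [h0, if_false]
        rw [go_cons, hsp]
        simp only [if_true, hne, Bool.false_eq_true, if_false]
        rw [go_acc (rest.map maskC) [] [num.reverse.reverse]]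
        have h2 := ih (a + (PySem.Int.ofChars? num).getD 0) [] (by simp)
        simp only [List.reverse_nil] at h2
        rw [h2]
        simp [intD]
        ring

-- ===== VERDICT (by name: the statement is the Claim_ definition above) =====
theorem solution_spec : Claim_equal_solution := by
  intro s _
  unfold Spec_solution
  have h := main_lemma s.toList 0 [] (by simp)
  simp only [List.reverse_nil, zero_add, intD] at h
  simpa [solution, solution_alt, PySem.Chars.split₀] using h
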